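-- pv_equiv track=rewrite | github.com/GiuliaDGM/glycan_analysis | src/dihedral_retrieval.py | is_glyco_phi
-- ===== SOURCE A (Python) =====
-- def is_glyco_phi(atoms: list) -> bool:
--     """
--     Glycosilic phi: The dihedral must include "O5" and "C1".
--     After removing one occurrence each of "O5" and "C1", the remaining two atoms
--     must include one that starts with "O" and one that starts with "C".
--     """
--     if len(atoms) != 4:
--         return False
--     if "O5" not in atoms or "C1" not in atoms:
--         return False
--     remaining = atoms.copy()
--     remaining.remove("O5")
--     remaining.remove("C1")
--     if len(remaining) != 2:
--         return False
--     return any(a.startswith("O") for a in remaining) and any(a.startswith("C") for a in remaining)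
-- ===== SOURCE B (Python) =====
-- def is_glyco_phi(atoms: list) -> bool:
--     if len(atoms) != 4 or "O5" not in atoms or "C1" not in atoms:
--         return False
--     nO = sum(1 for a in atoms if a.startswith("O"))
--     nC = sum(1 for a in atoms if a.startswith("C"))
--     return nO >= 2 and nC >= 2
-- ===== Notes on version B (the rewrite author's own statement) =====
-- stated objective: simpler
-- what changed: Replaces the copy/remove-one-occurrence-each/any-scan strategy with simple prefix counting: after the same membership guards, B counts atoms starting with 'O' and with 'C' over the whole list and requires both counts to be at least 2.
import Mathlib
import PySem

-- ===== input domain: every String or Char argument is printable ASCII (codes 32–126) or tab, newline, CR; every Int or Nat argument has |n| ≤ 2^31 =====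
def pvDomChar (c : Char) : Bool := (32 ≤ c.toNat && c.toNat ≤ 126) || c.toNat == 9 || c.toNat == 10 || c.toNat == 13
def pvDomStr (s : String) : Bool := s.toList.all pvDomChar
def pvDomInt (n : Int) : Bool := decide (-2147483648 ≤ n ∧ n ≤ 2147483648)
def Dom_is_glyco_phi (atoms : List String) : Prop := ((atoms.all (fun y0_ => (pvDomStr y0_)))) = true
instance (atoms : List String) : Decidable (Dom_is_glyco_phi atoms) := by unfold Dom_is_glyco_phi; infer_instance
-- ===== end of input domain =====

-- B replaces A's copy/remove/any-scan test by whole-list prefix counting (simpler decomposition, same cost).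


-- ===== PORT A =====
def is_glyco_phi (atoms : List String) : Bool :=
  if atoms.length ≠ 4 then false
  else if "O5" ∉ atoms ∨ "C1" ∉ atoms then false
  else
    match PySem.List.remove? atoms "O5" with
    | none => false  -- unreachable: the guard ensures "O5" ∈ atoms, so Python's .remove never raises
    | some r1 =>
      match PySem.List.remove? r1 "C1" with
      | none => false  -- unreachable likewise
      | some r2 =>
        if r2.length ≠ 2 then false
        else r2.any (fun a => PySem.Str.startswith a "O") && r2.any (fun a => PySem.Str.startswith a "C")

-- ===== PORT B =====
def is_glyco_phi_alt (atoms : List String) : Bool :=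
  if atoms.length ≠ 4 ∨ "O5" ∉ atoms ∨ "C1" ∉ atoms then false
  else
    let nO := atoms.countP (fun a => PySem.Str.startswith a "O")
    let nC := atoms.countP (fun a => PySem.Str.startswith a "C")
    decide (2 ≤ nO) && decide (2 ≤ nC)

-- ===== PRECONDITION & SPEC =====
def Spec_is_glyco_phi (atoms : List String) (out : Bool) : Prop := out = is_glyco_phi_alt atoms
instance (atoms : List String) (out : Bool) : Decidable (Spec_is_glyco_phi atoms out) := by unfold Spec_is_glyco_phi; infer_instance

-- ===== CLAIM (what is proved, stated in full; the proofs are below) =====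
def Claim_equal_is_glyco_phi : Prop := ∀ (atoms : List String), Dom_is_glyco_phi atoms → Spec_is_glyco_phi atoms (is_glyco_phi atoms)

-- ===== LEMMAS AND PROOFS =====

-- counting a predicate after erasing one occurrence of a member
theorem pv_countP_erase (p : String → Bool) (l : List String) (v : String) (h : v ∈ l) :
    (l.erase v).countP p = l.countP p - (if p v then 1 else 0) := by
  induction l with
  | nil => cases h
  | cons x xs ih =>
    by_cases hx : x = v
    · subst hx
      simp [List.countP_cons]
    · rw [List.erase_cons_tail (by simpa using hx)]
      have hv : v ∈ xs := by
        rcases List.mem_cons.mp h with h' | h'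
        · exact absurd h'.symm hx
        · exact h'
      have hle : (if p v then 1 else 0) ≤ xs.countP p := by
        split_ifs with hpv
        · exact List.countP_pos_iff.mpr ⟨v, hv, hpv⟩
        · exact Nat.zero_le _
      rw [List.countP_cons, List.countP_cons, ih hv]
      omega

-- any = "the count is positive"
theorem pv_any_eq_decide (p : String → Bool) (l : List String) :
    l.any p = decide (0 < l.countP p) := by
  by_cases h : ∃ a ∈ l, p a
  · simp [List.any_eq_true.mpr h, List.countP_pos_iff.mpr h]
  · have h1 : l.any p = false := by
      cases ha : l.any p
      · rfl
      · exact absurd (List.any_eq_true.mp ha) h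
    have h2 : ¬ 0 < l.countP p := fun hp => h (List.countP_pos_iff.mp hp)
    simp [h1, h2]

-- ===== VERDICT (by name: the statement is the Claim_ definition above) =====
theorem is_glyco_phi_spec : Claim_equal_is_glyco_phi := by
  intro atoms _
  unfold Spec_is_glyco_phi is_glyco_phi is_glyco_phi_alt
  by_cases hlen : atoms.length = 4
  · by_cases hO : "O5" ∈ atoms
    · by_cases hC : "C1" ∈ atoms
      · have hne : ("C1" : String) ≠ "O5" := by decide
        have hC1 : ("C1" : String) ∈ atoms.erase "O5" := (List.mem_erase_of_ne hne).mpr hC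
        rw [PySem.List.remove?_eq_some_erase _ _ hO]
        dsimp only
        rw [PySem.List.remove?_eq_some_erase _ _ hC1]
        dsimp only
        have hlen1 : (atoms.erase "O5").length = 3 := by
          rw [List.length_erase_of_mem hO, hlen]
        have hlen2 : ((atoms.erase "O5").erase "C1").length = 2 := by
          rw [List.length_erase_of_mem hC1, hlen1]
        have hPO : PySem.Str.startswith "O5" "O" = true := by decide
        have hPC : PySem.Str.startswith "C1" "O" = false := by decide
        have hQO : PySem.Str.startswith "O5" "C" = false := by decide
        have hQC : PySem.Str.startswith "C1" "C" = true := by decide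
        have hcountP : ((atoms.erase "O5").erase "C1").countP (fun a => PySem.Str.startswith a "O")
            = atoms.countP (fun a => PySem.Str.startswith a "O") - 1 := by
          rw [pv_countP_erase _ _ _ hC1, pv_countP_erase _ _ _ hO, hPC, hPO]
          simp
        have hcountQ : ((atoms.erase "O5").erase "C1").countP (fun a => PySem.Str.startswith a "C")
            = atoms.countP (fun a => PySem.Str.startswith a "C") - 1 := by
          rw [pv_countP_erase _ _ _ hC1, pv_countP_erase _ _ _ hO, hQC, hQO]
          simp
        simp only [hlen, hlen2, hO, hC, ne_eq, not_true_eq_false, not_false_eq_true,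
          or_self, or_false, false_or, if_false, if_true, ite_false, ite_true]
        simp only [pv_any_eq_decide, hcountP, hcountQ]
        have h2O : (decide (0 < atoms.countP (fun a => PySem.Str.startswith a "O") - 1))
            = decide (2 ≤ atoms.countP (fun a => PySem.Str.startswith a "O")) := by
          apply Bool.decide_congr; omega
        have h2C : (decide (0 < atoms.countP (fun a => PySem.Str.startswith a "C") - 1))
            = decide (2 ≤ atoms.countP (fun a => PySem.Str.startswith a "C")) := by
          apply Bool.decide_congr; omega
        rw [h2O, h2C]
      · simp [hC]
    · simp [hO]
  · simp [hlen]
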